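-- pv_equiv track=rewrite | github.com/lujiaxuan0520/Python-exercise | python_course/4-5/4-5.py | isabecedarian
-- ===== SOURCE A (Python) =====
-- def isabecedarian(word):
--     if isinstance(word,str):
--         word=word.lower()
--         for i in range(1,len(word)):
--             if word[i]<word[i-1]:
--                 return False
--         else:
--             return True
--     else:
--         raise Exception('arguments error!')
-- ===== SOURCE B (Python) =====
-- def isabecedarian(word):
--     if isinstance(word, str):
--         w = word.lower()
--         return list(w) == sorted(w)
--     else:
--         raise Exception('arguments error!')
-- ===== Notes on version B (the rewrite author's own statement) =====
-- stated objective: idiomatic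
-- what changed: Replaces the index-based adjacent-pair scan with a sort-and-compare: a lowercased string is abecedarian iff it equals its sorted form (list(w) == sorted(w)).
import Mathlib
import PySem

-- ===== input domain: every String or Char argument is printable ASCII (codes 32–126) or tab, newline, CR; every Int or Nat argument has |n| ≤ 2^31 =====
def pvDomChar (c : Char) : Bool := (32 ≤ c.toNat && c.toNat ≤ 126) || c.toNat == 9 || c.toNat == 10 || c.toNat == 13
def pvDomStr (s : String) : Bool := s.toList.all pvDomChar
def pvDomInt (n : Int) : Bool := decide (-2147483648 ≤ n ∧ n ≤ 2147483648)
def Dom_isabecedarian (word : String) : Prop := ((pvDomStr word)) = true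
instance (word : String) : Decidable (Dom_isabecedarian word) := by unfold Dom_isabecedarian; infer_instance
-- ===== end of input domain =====

-- B replaces A's adjacent-pair scan by the idiomatic sort-and-compare: w equals sorted(w).

-- ===== PORT A =====
-- A's for-loop over i in range(1, len(word)) with early 'return False' on word[i] < word[i-1]:
-- the obvious structural recursion comparing each adjacent pair of the lowercased characters.
def pvScanA : List Char → Bool
  | a :: b :: t => if b < a then false else pvScanA (b :: t)
  | _ => true

def isabecedarian (word : String) : Bool :=
  pvScanA (PySem.Str.lower word).toList

-- ===== PORT B =====
-- list(w) == sorted(w) on the lowercased string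
def isabecedarian_alt (word : String) : Bool :=
  let w := PySem.Str.lower word
  w.toList == PySem.List.sorted w.toList (fun x => x) false

-- ===== PRECONDITION & SPEC =====
def Spec_isabecedarian (word : String) (out : Bool) : Prop := out = isabecedarian_alt word
instance (word : String) (out : Bool) : Decidable (Spec_isabecedarian word out) := by unfold Spec_isabecedarian; infer_instance

-- ===== CLAIM (what is proved, stated in full; the proofs are below) =====
def Claim_equal_isabecedarian : Prop := ∀ (word : String), Dom_isabecedarian word → Spec_isabecedarian word (isabecedarian word)

-- ===== LEMMAS AND PROOFS =====
theorem pvScanA_iff_chain (l : List Char) : pvScanA l = true ↔ List.IsChain (· ≤ ·) l := by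
  induction l with
  | nil => simp [pvScanA]
  | cons a t ih =>
    cases t with
    | nil => simp [pvScanA]
    | cons b t' =>
      simp only [pvScanA, List.isChain_cons_cons]
      split_ifs with h
      · simp [not_le.mpr h]
      · simp [not_lt.mp h, ih]

theorem pvScanA_eq_sorted_cmp (l : List Char) :
    pvScanA l = (l == PySem.List.sorted l (fun x => x) false) := by
  by_cases h : pvScanA l = true
  · rw [h]
    have hc := (pvScanA_iff_chain l).mp h
    have hp : l.Pairwise (fun a b : Char => (fun x => x) a ≤ (fun x => x) b) := by
      simpa using List.isChain_iff_pairwise.mp hc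
    rw [PySem.List.sorted_eq_self_of_pairwise _ _ hp]
    simp
  · rw [Bool.not_eq_true] at h
    rw [h]
    symm
    rw [beq_eq_false_iff_ne]
    intro heq
    have hp := PySem.List.sorted_pairwise l (fun x : Char => x)
    rw [← heq] at hp
    have hc : List.IsChain (fun a b : Char => a ≤ b) l := List.isChain_iff_pairwise.mpr (by simpa using hp)
    have := (pvScanA_iff_chain l).mpr hc
    rw [h] at this; exact absurd this (by simp)

-- ===== VERDICT (by name: the statement is the Claim_ definition above) =====
theorem isabecedarian_spec : Claim_equal_isabecedarian := by
  intro word _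
  unfold Spec_isabecedarian isabecedarian isabecedarian_alt
  exact pvScanA_eq_sorted_cmp _
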